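-- pv_equiv track=rewrite | github.com/RasSoender/RAG_DTU | src/rag_dtu/scraping/scraping_course.py | split_text_by_titles
-- ===== SOURCE A (Python) =====
-- def split_text_by_titles(text, titles, scraped_info):
--     if not text or not titles:
--         return scraped_info
--
--     lines = text.split("\n")  # Split text into lines
--
--     title_n = len(titles)
--     title_index = 1
--     current_title = titles[0]
--     next_title = titles[1] if title_index < title_n else None
--     current_content = []
--
--     for line in lines:
--         line = line.strip()
--         if next_title and line == next_title:
--             scraped_info[current_title] = "\n".join(current_content).strip()
--
--             current_title = next_title
--             current_content = []
--             title_index += 1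
--             next_title = titles[title_index] if title_index < title_n else None
--         else:
--             current_content.append(line)
--
--     # Save the last section
--     if current_title:
--         scraped_info[current_title] = "\n".join(current_content).strip()
--
--     return scraped_info
-- ===== SOURCE B (Python) =====
-- def split_text_by_titles(text, titles, scraped_info):
--     if not text or not titles:
--         return scraped_info
--     rest = [l.strip() for l in text.split("\n")]
--     sections = []
--     cur = titles[0]
--     for t in titles[1:]:
--         if not t or t not in rest:
--             break
--         i = rest.index(t)
--         sections.append((cur, rest[:i]))
--         rest = rest[i + 1:]
--         cur = t
--     for t, content in sections:
--         scraped_info[t] = "\n".join(content).strip()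
--     if cur:
--         scraped_info[cur] = "\n".join(rest).strip()
--     return scraped_info
-- ===== Notes on version B (the rewrite author's own statement) =====
-- stated objective: alternative
-- what changed: B iterates over the titles, locating each next title with list.index on the remaining suffix and slicing out each section's lines, instead of A's line-by-line state machine that threads current_title/next_title/current_content through one scan of the lines.
import Mathlib
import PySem

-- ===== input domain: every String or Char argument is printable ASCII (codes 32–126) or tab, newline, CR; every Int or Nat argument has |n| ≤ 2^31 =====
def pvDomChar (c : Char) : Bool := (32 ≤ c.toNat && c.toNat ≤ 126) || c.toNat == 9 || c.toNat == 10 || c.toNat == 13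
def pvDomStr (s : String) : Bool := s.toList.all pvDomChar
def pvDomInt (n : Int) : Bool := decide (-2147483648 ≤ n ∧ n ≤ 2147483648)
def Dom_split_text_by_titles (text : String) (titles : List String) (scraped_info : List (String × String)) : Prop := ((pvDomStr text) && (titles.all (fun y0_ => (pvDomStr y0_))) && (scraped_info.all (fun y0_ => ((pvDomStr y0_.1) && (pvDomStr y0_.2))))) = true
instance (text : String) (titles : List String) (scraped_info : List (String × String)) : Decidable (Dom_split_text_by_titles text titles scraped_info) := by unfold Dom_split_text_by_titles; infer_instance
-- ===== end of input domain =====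

-- B replaces A's line-by-line state machine by a loop over the titles that finds each next
-- title with list.index on the remaining suffix and slices out each section (objective:
-- alternative decomposition). Both Pythons mutate the scraped_info dict in place and return
-- it; the equivalence proved here is about the returned mapping (as an assoc list).

-- ===== PORT A =====
-- A's for-loop over lines as structural recursion on the same state
-- (current_title, title_index, next_title, current_content, dict); the post-loop
-- "save the last section" guard is the base case.
def aGo (titles : List String) : List String → String → Nat → Option String → List String → PySem.Dict String String → PySem.Dict String String
  | [], cur, _, _, content, d =>
      if cur ≠ "" then d.insert cur (PySem.Str.strip (PySem.Str.join "\n" content)) else d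
  | l :: ls, cur, idx, next?, content, d =>
      let line := PySem.Str.strip l
      match next? with
      | some nt =>
          if nt ≠ "" ∧ line = nt then
            let d' := d.insert cur (PySem.Str.strip (PySem.Str.join "\n" content))
            let idx' := idx + 1
            aGo titles ls nt idx' (if idx' < titles.length then titles[idx']? else none) [] d'
          else aGo titles ls cur idx next? (content ++ [line]) d
      | none => aGo titles ls cur idx next? (content ++ [line]) d

def split_text_by_titles (text : String) (titles : List String) (scraped_info : List (String × String)) : List (String × String) :=
  if text = "" ∨ titles = [] then scraped_info
  else
    let lines := (PySem.Str.split? text "\n").getD []  -- sep "\n" ≠ "" so split? is `some`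
    (aGo titles lines (titles.headD "") 1 (if 1 < titles.length then titles[1]? else none) [] (PySem.Dict.ofList scraped_info)).items

-- ===== PORT B =====
-- Source B's for-loop over titles[1:]: returns (sections, cur, rest) — `rest.index(t)` is
-- PySem.List.index?; the slices rest[:i] / rest[i+1:] are List.take i / List.drop (i+1),
-- exact here since 0 ≤ i.
def bScan : List String → String → List String → (List (String × List String)) × String × List String
  | rest, cur, [] => ([], cur, rest)
  | rest, cur, t :: ts =>
      if t = "" then ([], cur, rest)
      else
        match PySem.List.index? rest t with
        | none => ([], cur, rest)
        | some i =>
            let r := bScan (rest.drop (i + 1)) t ts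
            ((cur, rest.take i) :: r.1, r.2)

def split_text_by_titles_alt (text : String) (titles : List String) (scraped_info : List (String × String)) : List (String × String) :=
  if text = "" ∨ titles = [] then scraped_info
  else
    let rest := ((PySem.Str.split? text "\n").getD []).map PySem.Str.strip  -- sep "\n" ≠ "" so split? is `some`
    let r := bScan rest (titles.headD "") (titles.drop 1)
    let d := r.1.foldl (fun d tc => d.insert tc.1 (PySem.Str.strip (PySem.Str.join "\n" tc.2))) (PySem.Dict.ofList scraped_info)
    (if r.2.1 ≠ "" then d.insert r.2.1 (PySem.Str.strip (PySem.Str.join "\n" r.2.2)) else d).items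

-- ===== PRECONDITION & SPEC =====
def Spec_split_text_by_titles (text : String) (titles : List String) (scraped_info : List (String × String)) (out : List (String × String)) : Prop := out = split_text_by_titles_alt text titles scraped_info
instance (text : String) (titles : List String) (scraped_info : List (String × String)) (out : List (String × String)) : Decidable (Spec_split_text_by_titles text titles scraped_info out) := by unfold Spec_split_text_by_titles; infer_instance

-- ===== CLAIM (what is proved, stated in full; the proofs are below) =====
def Claim_equal_split_text_by_titles : Prop := ∀ (text : String) (titles : List String) (scraped_info : List (String × String)), Dom_split_text_by_titles text titles scraped_info → Spec_split_text_by_titles text titles scraped_info (split_text_by_titles text titles scraped_info)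

-- ===== LEMMAS AND PROOFS =====

-- helper for the invariant: prepend pending accumulated lines to the first upcoming section
def withAcc (acc : List String) (r : (List (String × List String)) × String × List String) : (List (String × List String)) × String × List String :=
  match r with
  | ([], c, rest) => ([], c, acc ++ rest)
  | ((t, x) :: s, c, rest) => ((t, acc ++ x) :: s, c, rest)

-- the dict produced from a bScan result
def emit (d : PySem.Dict String String) (r : (List (String × List String)) × String × List String) : PySem.Dict String String :=
  let d' := r.1.foldl (fun d tc => d.insert tc.1 (PySem.Str.strip (PySem.Str.join "\n" tc.2))) d
  if r.2.1 ≠ "" then d'.insert r.2.1 (PySem.Str.strip (PySem.Str.join "\n" r.2.2)) else d'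

theorem bScan_nil (cur : String) (ts : List String) : bScan [] cur ts = ([], cur, []) := by
  cases ts with
  | nil => rfl
  | cons t ts =>
      simp only [bScan, PySem.List.index?]
      split <;> simp [List.idxOf?]

theorem withAcc_nil (r : (List (String × List String)) × String × List String) : withAcc [] r = r := by
  obtain ⟨s, c, rest⟩ := r
  cases s with
  | nil => rfl
  | cons p s => obtain ⟨t, x⟩ := p; rfl

theorem next_if_eq (titles : List String) (i : Nat) :
    (if i < titles.length then titles[i]? else none) = titles[i]? := by
  split
  · rfl
  · exact (List.getElem?_eq_none (by omega)).symm

theorem bScan_cons_skip (line : String) (rest : List String) (cur t : String) (ts : List String) (acc : List String)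
    (h : ¬ (t ≠ "" ∧ line = t)) :
    withAcc acc (bScan (line :: rest) cur (t :: ts)) = withAcc (acc ++ [line]) (bScan rest cur (t :: ts)) := by
  by_cases ht : t = ""
  · simp [bScan, ht, withAcc]
  · have hl : line ≠ t := fun he => h ⟨ht, he⟩
    simp only [bScan, if_neg ht]
    rw [PySem.List.index?_cons_of_ne rest hl]
    cases hi : PySem.List.index? rest t with
    | none => simp [withAcc]
    | some i => simp [withAcc, List.drop_succ_cons]

theorem main_inv (titles : List String) :
    ∀ (lines acc : List String) (cur : String) (idx : Nat) (d : PySem.Dict String String),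
      aGo titles lines cur idx titles[idx]? acc d =
        emit d (withAcc acc (bScan (lines.map PySem.Str.strip) cur (titles.drop idx))) := by
  intro lines
  induction lines with
  | nil =>
      intro acc cur idx d
      simp [aGo, bScan_nil, withAcc, emit]
  | cons l ls ih =>
      intro acc cur idx d
      have hdrop1 : titles.drop (idx + 1) = (titles.drop idx).tail := by
        rw [List.tail_drop]
      have hhead : titles[idx]? = (titles.drop idx).head? := by
        rw [List.head?_eq_getElem?, List.getElem?_drop]; norm_num
      rcases hd : titles.drop idx with _ | ⟨t, ts⟩
      · -- no next title: accumulate the stripped line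
        rw [hd] at hdrop1 hhead
        have hn : titles[idx]? = none := by rw [hhead]; rfl
        rw [hn]
        simp only [aGo]
        rw [show (none : Option String) = titles[idx]? from hn.symm, ih, hd]
        simp [bScan, withAcc, emit]
      · rw [hd] at hdrop1 hhead
        simp only [List.head?_cons] at hhead
        rw [hhead]
        simp only [aGo]
        by_cases hm : t ≠ "" ∧ PySem.Str.strip l = t
        · -- boundary line: close the current section, start the next one
          rw [if_pos hm, next_if_eq, ih, withAcc_nil, hdrop1, List.tail_cons]
          have ht : ¬ t = "" := by simpa using hm.1
          simp only [List.map_cons, bScan, if_neg ht, hm.2, PySem.List.index?_cons_self,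
            List.take_zero, List.drop_succ_cons, List.drop_zero]
          simp [withAcc, emit]
        · -- ordinary line: accumulate it
          rw [if_neg hm,
            show (some t : Option String) = titles[idx]? from hhead.symm, ih, hd,
            List.map_cons, bScan_cons_skip _ _ _ _ _ _ hm]

-- ===== VERDICT (by name: the statement is the Claim_ definition above) =====
theorem split_text_by_titles_spec : Claim_equal_split_text_by_titles := by
  intro text titles si _
  show split_text_by_titles text titles si = split_text_by_titles_alt text titles si
  unfold split_text_by_titles split_text_by_titles_alt
  by_cases h : text = "" ∨ titles = []
  · rw [if_pos h, if_pos h]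
  · rw [if_neg h, if_neg h]
    simp only [next_if_eq]
    rw [main_inv, withAcc_nil]
    rfl
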